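-- pv_equiv track=rewrite | github.com/Mao-beta/AtCoder | _test.py | syakutori_acc
-- ===== SOURCE A (Python) =====
-- def syakutori_acc(array):
--     n = len(array)
--     r = 1
--     res = 0
--     for l in range(n):
--         while 0 < r < n and (r <= l or array[r] > array[r-1]):
--             r += 1
--         res += r-l
--         if l == r:
--             r += 1
--
--     return res
-- ===== SOURCE B (Python) =====
-- def syakutori_acc(array):
--     res = 0
--     cur = 0
--     for i in range(len(array)):
--         if i > 0 and array[i] > array[i-1]:
--             cur += 1
--         else:
--             cur = 1
--         res += cur
--     return res
-- ===== Notes on version B (the rewrite author's own statement) =====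
-- stated objective: simpler
-- what changed: Replaced the two-pointer window (per start index, advance a shared right pointer while the run keeps increasing, add r-l) with a single forward pass that maintains the length of the strictly-increasing run ending at the current index and adds it to the total.
import Mathlib
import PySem

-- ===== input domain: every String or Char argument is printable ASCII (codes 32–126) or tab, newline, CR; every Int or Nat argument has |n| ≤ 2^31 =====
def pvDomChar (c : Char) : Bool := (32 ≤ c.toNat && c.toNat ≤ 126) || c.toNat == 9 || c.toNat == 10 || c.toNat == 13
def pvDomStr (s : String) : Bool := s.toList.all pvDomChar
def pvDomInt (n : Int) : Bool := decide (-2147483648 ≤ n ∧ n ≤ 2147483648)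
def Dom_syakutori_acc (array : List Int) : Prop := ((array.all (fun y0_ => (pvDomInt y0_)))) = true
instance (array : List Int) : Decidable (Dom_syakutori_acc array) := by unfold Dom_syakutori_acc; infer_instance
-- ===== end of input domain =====

-- B replaces A's two-pointer window with a single pass that adds the length of the
-- strictly-increasing run ending at each index; same value, simpler control flow.

-- ===== PORT A =====
-- the inner `while` loop of A; indices handed to pyGetD are exactly Python's array[r], array[r-1]
def pvAdvance (a : List Int) (l r : Nat) : Nat :=
  if h : 0 < r ∧ r < a.length ∧ (r ≤ l ∨ PySem.List.pyGetD a (r : Int) 0 > PySem.List.pyGetD a ((r : Int) - 1) 0) then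
    pvAdvance a l (r + 1)
  else r
termination_by a.length - r
decreasing_by omega

-- one iteration of A's `for l in range(n)` body, state = (r, res)
def pvStepA (a : List Int) (st : Nat × Int) (l : Nat) : Nat × Int :=
  let r := pvAdvance a l st.1
  let res := st.2 + ((r : Int) - (l : Int))
  (if l = r then r + 1 else r, res)

def syakutori_acc (array : List Int) : Int :=
  ((List.range array.length).foldl (pvStepA array) (1, 0)).2

-- ===== PORT B =====
-- one iteration of B's loop, state = (res, cur)
def pvStepB (a : List Int) (st : Int × Int) (i : Nat) : Int × Int :=
  let cur := if 0 < i ∧ PySem.List.pyGetD a (i : Int) 0 > PySem.List.pyGetD a ((i : Int) - 1) 0 then st.2 + 1 else 1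
  (st.1 + cur, cur)

def syakutori_acc_alt (array : List Int) : Int :=
  ((List.range array.length).foldl (pvStepB array) (0, 0)).1

-- ===== PRECONDITION & SPEC =====
def Spec_syakutori_acc (array : List Int) (out : Int) : Prop := out = syakutori_acc_alt array
instance (array : List Int) (out : Int) : Decidable (Spec_syakutori_acc array out) := by unfold Spec_syakutori_acc; infer_instance

-- ===== CLAIM (what is proved, stated in full; the proofs are below) =====
def Claim_equal_syakutori_acc : Prop := ∀ (array : List Int), Dom_syakutori_acc array → Spec_syakutori_acc array (syakutori_acc array)

-- ===== LEMMAS AND PROOFS =====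

-- pvE a l = exclusive end of the maximal strictly-increasing run starting at l
def pvE (a : List Int) (l : Nat) : Nat :=
  if h : l + 1 < a.length ∧ a.getD (l + 1) 0 > a.getD l 0 then pvE a (l + 1) else l + 1
termination_by a.length - l
decreasing_by omega

-- pvC a i = length of the strictly-increasing run ending at i (as an Int, like B's cur)
def pvC (a : List Int) : Nat → Int
  | 0 => 1
  | i + 1 => if a.getD (i + 1) 0 > a.getD i 0 then pvC a i + 1 else 1

theorem pvE_ge (a : List Int) (l : Nat) : l + 1 ≤ pvE a l := by
  fun_induction pvE a l with
  | case1 l h ih => omega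
  | case2 l h => omega

theorem pvE_le (a : List Int) (l : Nat) : l < a.length → pvE a l ≤ a.length := by
  fun_induction pvE a l with
  | case1 l h ih => intro _; exact ih h.1
  | case2 l h => omega

theorem pvE_mono (a : List Int) (l : Nat) : pvE a l ≤ pvE a (l + 1) := by
  rw [pvE]
  split
  · exact le_refl _
  · have := pvE_ge a (l + 1); omega

theorem pvE_inrun (a : List Int) (l : Nat) :
    ∀ r, l < r → r < pvE a l → a.getD r 0 > a.getD (r - 1) 0 := by
  fun_induction pvE a l with
  | case1 l h ih =>
      intro r h1 h2
      by_cases hr : r = l + 1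
      · subst hr; simpa using h.2
      · exact ih r (by omega) h2
  | case2 l h => intro r h1 h2; omega

theorem pvE_exit (a : List Int) (l : Nat) :
    l < a.length → pvE a l = a.length ∨ a.getD (pvE a l) 0 ≤ a.getD (pvE a l - 1) 0 := by
  fun_induction pvE a l with
  | case1 l h ih => intro _; exact ih h.1
  | case2 l h =>
      intro hl
      by_cases hn : l + 1 < a.length
      · right
        have : ¬ a.getD (l + 1) 0 > a.getD l 0 := fun hc => h ⟨hn, hc⟩
        simpa using this
      · left; omega

theorem pvAdvance_correct (a : List Int) (l : Nat) (hl : l < a.length) :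
    ∀ k r, a.length - r ≤ k → 0 < r → r ≤ pvE a l → pvAdvance a l r = pvE a l := by
  intro k
  induction k with
  | zero =>
      intro r hk h0 hr
      have hle := pvE_le a l hl
      rw [pvAdvance]
      rw [dif_neg (by omega)]
      omega
  | succ k ih =>
      intro r hk h0 hr
      have hge := pvE_ge a l
      have hle := pvE_le a l hl
      rw [pvAdvance]
      by_cases hc : 0 < r ∧ r < a.length ∧ (r ≤ l ∨ PySem.List.pyGetD a (r : Int) 0 > PySem.List.pyGetD a ((r : Int) - 1) 0)
      · rw [dif_pos hc]
        -- show r < pvE a l, so the recursive call stays in range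
        have hrlt : r < pvE a l := by
          rcases lt_or_eq_of_le hr with h | h
          · exact h
          · exfalso
            -- r = pvE a l: the while condition cannot hold
            rcases hc.2.2 with hrl | hinc
            · omega
            · have hcast : ((r : Int) - 1) = ((r - 1 : Nat) : Int) := by omega
              rw [hcast] at hinc
              simp only [PySem.List.pyGetD_natCast] at hinc
              have hget : a.getD r 0 = a[r]'(by omega) := List.getD_eq_getElem a 0 hc.2.1
              rcases pvE_exit a l hl with he | he
              · omega
              · rw [← h] at he
                have h1 : a.getD r 0 = List.getD a r 0 := rfl
                omega
        exact ih (r + 1) (by omega) (by omega) (by omega)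
      · rw [dif_neg hc]
        -- the condition failed: r must already be pvE a l
        by_contra hne
        have hrlt : r < pvE a l := by omega
        by_cases hrn : r < a.length
        · -- then ¬(r ≤ l) and the step at r increases, contradiction with hc
          apply hc
          refine ⟨h0, hrn, ?_⟩
          by_cases hrl : r ≤ l
          · exact Or.inl hrl
          · right
            have := pvE_inrun a l r (by omega) hrlt
            have hcast : ((r : Int) - 1) = ((r - 1 : Nat) : Int) := by omega
            rw [hcast]
            simp only [PySem.List.pyGetD_natCast]
            exact this
        · omega

theorem loopA (a : List Int) :
    ∀ k l r res, l + k = a.length →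
      (l = 0 ∧ r = 1 ∨ 0 < l ∧ r = pvE a (l - 1)) →
      ((List.range' l k).foldl (pvStepA a) (r, res)).2
        = res + ∑ j ∈ Finset.range k, ((pvE a (l + j) : Int) - ((l + j : Nat) : Int)) := by
  intro k
  induction k with
  | zero => intro l r res _ _; simp
  | succ k ih =>
      intro l r res hlen hinv
      have hl : l < a.length := by omega
      have hge := pvE_ge a l
      -- the advance lands exactly on pvE a l
      have hadv : pvAdvance a l r = pvE a l := by
        rcases hinv with ⟨h0, h1⟩ | ⟨h0, h1⟩
        · subst h0 h1
          exact pvAdvance_correct a 0 hl (a.length - 1) 1 (by omega) (by omega) (pvE_ge a 0)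
        · subst h1
          have hm : pvE a (l - 1) ≤ pvE a l := by
            have := pvE_mono a (l - 1)
            have : pvE a (l - 1) ≤ pvE a (l - 1 + 1) := this
            simpa [Nat.sub_add_cancel h0] using this
          have hg := pvE_ge a (l - 1)
          exact pvAdvance_correct a l hl (a.length - pvE a (l - 1)) _ (by omega) (by omega) hm
      rw [List.range'_succ, List.foldl_cons]
      have hstep : pvStepA a (r, res) l
          = (pvE a l, res + ((pvE a l : Int) - (l : Int))) := by
        simp only [pvStepA, hadv]
        rw [if_neg (by omega)]
      rw [hstep]
      rw [ih (l + 1) (pvE a l) _ (by omega) (Or.inr ⟨by omega, by simp⟩)]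
      rw [Finset.sum_range_succ']
      have hcongr : ∀ j ∈ Finset.range k,
          ((pvE a (l + 1 + j) : Int) - ((l + 1 + j : Nat) : Int))
            = ((pvE a (l + (j + 1)) : Int) - ((l + (j + 1) : Nat) : Int)) := by
        intro j _
        have : l + 1 + j = l + (j + 1) := by omega
        rw [this]
      rw [Finset.sum_congr rfl hcongr]
      simp only [Nat.add_zero]
      push_cast
      ring

theorem A_eq_sum (a : List Int) :
    syakutori_acc a = ∑ l ∈ Finset.range a.length, ((pvE a l : Int) - (l : Int)) := by
  unfold syakutori_acc
  rw [List.range_eq_range']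
  rw [loopA a a.length 0 1 0 (by omega) (Or.inl ⟨rfl, rfl⟩)]
  simp

theorem loopB (a : List Int) :
    ∀ k i res cur, (i = 0 ∨ cur = pvC a (i - 1)) →
      ((List.range' i k).foldl (pvStepB a) (res, cur)).1
        = res + ∑ j ∈ Finset.range k, pvC a (i + j) := by
  intro k
  induction k with
  | zero => intro i res cur _; simp
  | succ k ih =>
      intro i res cur hinv
      rw [List.range'_succ, List.foldl_cons]
      have hstep : pvStepB a (res, cur) i = (res + pvC a i, pvC a i) := by
        rcases Nat.eq_zero_or_pos i with h0 | h0
        · subst h0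
          simp [pvStepB, pvC]
        · obtain ⟨m, rfl⟩ : ∃ m, i = m + 1 := ⟨i - 1, by omega⟩
          rcases hinv with h | h
          · omega
          · simp only [Nat.add_sub_cancel] at h
            subst h
            have hcast : (((m + 1 : Nat) : Int) - 1) = ((m : Nat) : Int) := by push_cast; ring
            by_cases hg : a.getD (m + 1) 0 > a.getD m 0
            · simp only [pvStepB, pvC, hcast, PySem.List.pyGetD_natCast]
              rw [if_pos ⟨by omega, hg⟩, if_pos hg]
            · simp only [pvStepB, pvC, hcast, PySem.List.pyGetD_natCast]
              rw [if_neg (fun hc => hg hc.2), if_neg hg]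
      rw [hstep]
      rw [ih (i + 1) _ _ (Or.inr (by simp))]
      rw [Finset.sum_range_succ']
      have hcongr : ∀ j ∈ Finset.range k, pvC a (i + 1 + j) = pvC a (i + (j + 1)) := by
        intro j _
        have : i + 1 + j = i + (j + 1) := by omega
        rw [this]
      rw [Finset.sum_congr rfl hcongr]
      simp only [Nat.add_zero]
      ring

theorem B_eq_sum (a : List Int) :
    syakutori_acc_alt a = ∑ i ∈ Finset.range a.length, pvC a i := by
  unfold syakutori_acc_alt
  rw [List.range_eq_range']
  rw [loopB a a.length 0 0 0 (Or.inl rfl)]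
  simp

theorem pvC_ge_one (a : List Int) (i : Nat) : 1 ≤ pvC a i := by
  induction i with
  | zero => simp [pvC]
  | succ i ih => rw [pvC]; split <;> omega

theorem pvC_le (a : List Int) (i : Nat) : pvC a i ≤ (i : Int) + 1 := by
  induction i with
  | zero => simp [pvC]
  | succ i ih => rw [pvC]; split <;> (push_cast; omega)

-- run from l still covers i  ↔  every step in (l, i] increases
theorem pvE_char (a : List Int) (l : Nat) :
    ∀ k, l + k < a.length →
      (l + k < pvE a l ↔ ∀ r, l < r → r ≤ l + k → a.getD r 0 > a.getD (r - 1) 0) := by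
  intro k
  induction k with
  | zero =>
      intro _
      constructor
      · intro _ r h1 h2; omega
      · intro _; have := pvE_ge a l; omega
  | succ k ih =>
      intro hk
      constructor
      · intro h r h1 h2
        exact pvE_inrun a l r h1 (by omega)
      · intro hall
        have hk' : l + k < a.length := by omega
        have hE : l + k < pvE a l := (ih hk').2 (fun r h1 h2 => hall r h1 (by omega))
        rcases pvE_exit a l (by omega) with he | he
        · omega
        · by_contra hne
          have heq : pvE a l = l + k + 1 := by omega
          rw [heq] at he
          have h3 : a.getD (l + k + 1) 0 > a.getD (l + k) 0 := by
            simpa using hall (l + k + 1) (by omega) (by omega)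
          simp only [Nat.add_sub_cancel] at he
          omega

theorem pvC_char (a : List Int) (l : Nat) :
    ∀ k : Nat, ((k : Int) < pvC a (l + k) ↔ ∀ r, l < r → r ≤ l + k → a.getD r 0 > a.getD (r - 1) 0) := by
  intro k
  induction k with
  | zero =>
      constructor
      · intro _ r h1 h2; omega
      · intro _; have := pvC_ge_one a l; simpa using this
  | succ k ih =>
      have hunf : pvC a (l + (k + 1)) = if a.getD (l + k + 1) 0 > a.getD (l + k) 0 then pvC a (l + k) + 1 else 1 := by
        have : l + (k + 1) = (l + k) + 1 := by omega
        rw [this, pvC]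
      rw [hunf]
      by_cases hinc : a.getD (l + k + 1) 0 > a.getD (l + k) 0
      · rw [if_pos hinc]
        constructor
        · intro h r h1 h2
          by_cases hr : r = l + k + 1
          · subst hr; simpa using hinc
          · exact ih.1 (by push_cast at h ⊢; omega) r h1 (by omega)
        · intro hall
          have : (k : Int) < pvC a (l + k) := ih.2 (fun r h1 h2 => hall r h1 (by omega))
          push_cast
          omega
      · rw [if_neg hinc]
        constructor
        · intro h; push_cast at h; omega
        · intro hall
          exfalso
          exact hinc (by simpa using hall (l + k + 1) (by omega) (by omega))

theorem pv_key (a : List Int) (l i : Nat) (hli : l ≤ i) (hi : i < a.length) :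
    (i < pvE a l ↔ ((i : Int) - (l : Int)) < pvC a i) := by
  obtain ⟨k, rfl⟩ : ∃ k, i = l + k := ⟨i - l, by omega⟩
  rw [show ((l + k : Nat) : Int) - (l : Int) = (k : Int) by push_cast; ring]
  exact (pvE_char a l k hi).trans (pvC_char a l k).symm

theorem sum_ind (lo hi : Nat) :
    ∀ n, ∑ l ∈ Finset.range n, (if lo ≤ l ∧ l < hi then (1 : Int) else 0)
      = ((min hi n : Nat) : Int) - ((min lo (min hi n) : Nat) : Int) := by
  intro n
  induction n with
  | zero => simp
  | succ n ih =>
      rw [Finset.sum_range_succ, ih]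
      split_ifs with h <;> (push_cast; omega)

theorem sum_swap_eq (a : List Int) :
    ∑ l ∈ Finset.range a.length, ((pvE a l : Int) - (l : Int))
      = ∑ i ∈ Finset.range a.length, pvC a i := by
  have step1 : ∀ l ∈ Finset.range a.length,
      ((pvE a l : Int) - (l : Int))
        = ∑ i ∈ Finset.range a.length, (if l ≤ i ∧ i < pvE a l then (1 : Int) else 0) := by
    intro l hl
    rw [Finset.mem_range] at hl
    have h1 := pvE_ge a l
    have h2 := pvE_le a l hl
    rw [sum_ind l (pvE a l) a.length]
    omega
  rw [Finset.sum_congr rfl step1, Finset.sum_comm]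
  apply Finset.sum_congr rfl
  intro i hi
  rw [Finset.mem_range] at hi
  have hc1 := pvC_ge_one a i
  have hc2 := pvC_le a i
  have step2 : ∀ l ∈ Finset.range a.length,
      (if l ≤ i ∧ i < pvE a l then (1 : Int) else 0)
        = (if i + 1 - (pvC a i).toNat ≤ l ∧ l < i + 1 then (1 : Int) else 0) := by
    intro l _
    apply if_congr _ rfl rfl
    constructor
    · rintro ⟨h1, h2⟩
      have := (pv_key a l i h1 hi).1 h2
      omega
    · rintro ⟨h1, h2⟩
      have hli : l ≤ i := by omega
      refine ⟨hli, (pv_key a l i hli hi).2 ?_⟩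
      omega
  rw [Finset.sum_congr rfl step2, sum_ind]
  omega

-- ===== VERDICT (by name: the statement is the Claim_ definition above) =====
theorem syakutori_acc_spec : Claim_equal_syakutori_acc := by
  intro array _
  unfold Spec_syakutori_acc
  rw [A_eq_sum, B_eq_sum, sum_swap_eq]
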